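-- pv_equiv track=rewrite | github.com/Nomoloss/Jeu_POO_Nanatoridori | main/main.py | calcul_force
-- ===== SOURCE A (Python) =====
-- def calcul_force(liste_cartes):
--     if liste_cartes==[]:
--         return 0
--     long=len(liste_cartes)
--     chiffre=liste_cartes[0]
--     resultat=0
--     for i in range(long):
--         resultat+=chiffre*(10**(i))
--     return resultat
-- ===== SOURCE B (Python) =====
-- def calcul_force(liste_cartes):
--     chiffre = liste_cartes[0] if liste_cartes else 0
--     return chiffre * ((10 ** len(liste_cartes) - 1) // 9)
-- ===== Notes on version B (the rewrite author's own statement) =====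
-- stated objective: faster
-- what changed: Replaces the loop summing chiffre*10**i with the closed-form repunit chiffre*((10**n-1)//9).
import Mathlib
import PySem

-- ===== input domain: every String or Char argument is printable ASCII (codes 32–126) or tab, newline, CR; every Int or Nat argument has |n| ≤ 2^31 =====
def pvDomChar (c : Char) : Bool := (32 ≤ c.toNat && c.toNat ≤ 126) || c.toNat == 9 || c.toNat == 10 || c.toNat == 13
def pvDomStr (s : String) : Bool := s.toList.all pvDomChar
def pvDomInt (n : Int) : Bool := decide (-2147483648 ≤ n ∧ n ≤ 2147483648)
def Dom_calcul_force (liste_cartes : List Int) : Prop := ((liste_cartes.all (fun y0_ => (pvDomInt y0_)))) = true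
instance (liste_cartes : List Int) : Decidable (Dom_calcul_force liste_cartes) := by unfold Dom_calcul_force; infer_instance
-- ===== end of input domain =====

-- B replaces A's digit-by-digit loop with the closed-form repunit chiffre*((10^n-1)//9): O(1) arithmetic ops instead of O(n) multiplications.

-- ===== PORT A =====
-- literal port: empty check, then loop i in range(long) accumulating resultat += chiffre*10**i
def calcul_force (liste_cartes : List Int) : Int :=
  if liste_cartes = [] then 0
  else
    let long : Int := (liste_cartes.length : Int)
    let chiffre : Int := PySem.List.pyGetD liste_cartes 0 0
    (PySem.List.pyRange 0 long 1).foldl (fun resultat i => resultat + chiffre * 10 ^ i.toNat) 0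

-- ===== PORT B =====
def calcul_force_alt (liste_cartes : List Int) : Int :=
  let chiffre : Int := if liste_cartes ≠ [] then PySem.List.pyGetD liste_cartes 0 0 else 0
  chiffre * PySem.Int.floordiv (10 ^ liste_cartes.length - 1) 9

-- ===== PRECONDITION & SPEC =====
def Spec_calcul_force (liste_cartes : List Int) (out : Int) : Prop := out = calcul_force_alt liste_cartes
instance (liste_cartes : List Int) (out : Int) : Decidable (Spec_calcul_force liste_cartes out) := by unfold Spec_calcul_force; infer_instance

-- ===== CLAIM (what is proved, stated in full; the proofs are below) =====
def Claim_equal_calcul_force : Prop := ∀ (liste_cartes : List Int), Dom_calcul_force liste_cartes → Spec_calcul_force liste_cartes (calcul_force liste_cartes)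

-- ===== LEMMAS AND PROOFS =====

/-- repunit of length n: 0, 1, 11, 111, … -/
def pvRep : Nat → Int
  | 0 => 0
  | n + 1 => pvRep n + 10 ^ n

theorem pvRep_nine (n : Nat) : 9 * pvRep n = 10 ^ n - 1 := by
  induction n with
  | zero => simp [pvRep]
  | succ n ih => simp [pvRep, pow_succ]; ring_nf; ring_nf at ih; omega

theorem pvFoldl_rep (c : Int) (n : Nat) (init : Int) :
    (PySem.List.pyRange 0 (n : Int) 1).foldl (fun r i => r + c * 10 ^ i.toNat) init
      = init + c * pvRep n := by
  induction n generalizing init with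
  | zero => simp [pvRep]
  | succ n ih =>
      have h : PySem.List.pyRange 0 ((n : Int) + 1) 1
          = PySem.List.pyRange 0 (n : Int) 1 ++ [(n : Int)] :=
        PySem.List.pyRange_one_succ_right (by positivity)
      push_cast
      rw [h, List.foldl_append, ih]
      simp [pvRep]
      ring

theorem pvFloordiv_rep (n : Nat) : PySem.Int.floordiv (10 ^ n - 1) 9 = pvRep n := by
  rw [← pvRep_nine n]
  simp [PySem.Int.floordiv, Int.mul_fdiv_cancel_left _ (by norm_num : (9:Int) ≠ 0)]

-- ===== VERDICT (by name: the statement is the Claim_ definition above) =====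
theorem calcul_force_spec : Claim_equal_calcul_force := by
  intro l _
  unfold Spec_calcul_force calcul_force calcul_force_alt
  rcases l with _ | ⟨x, xs⟩
  · simp
  · simp only [if_neg (by simp : ¬ (x :: xs = [])), ne_eq, if_pos (by simp : ¬ (x :: xs = []))]
    rw [pvFoldl_rep, pvFloordiv_rep]
    ring
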